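-- pv_equiv track=rewrite | github.com/NeuroTafl/OpenTafl-Python | NeuroTaflAgent/Board.py | getRowListFromRowString
-- ===== SOURCE A (Python) =====
-- def getRowListFromRowString(rowPositionString: str) -> list:
--     newRowList = []
--     currCharIndex = 0
--     while currCharIndex < len(rowPositionString):
--         if rowPositionString[currCharIndex].isdigit():
--             emptyBucketCount = int(rowPositionString[currCharIndex])
--             if (
--                 currCharIndex < len(rowPositionString) - 1
--                 and rowPositionString[currCharIndex + 1].isdigit()
--             ):
--                 emptyBucketCount = int(
--                     rowPositionString[currCharIndex : currCharIndex + 2]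
--                 )
--                 currCharIndex += 1  # skip second digit in main loop
--             for _ in range(emptyBucketCount):
--                 newRowList.append("e")
--         else:
--             newRowList.append(rowPositionString[currCharIndex])
--         currCharIndex += 1
--     return newRowList
-- ===== SOURCE B (Python) =====
-- import re
--
-- def getRowListFromRowString(rowPositionString: str) -> list:
--     # Tokenize into greedy 1-2 digit runs or single characters, then expand.
--     return [
--         cell
--         for tok in re.findall(r'\d{1,2}|[\s\S]', rowPositionString)
--         for cell in (['e'] * int(tok) if tok.isdigit() else [tok])
--     ]
-- ===== Notes on version B (the rewrite author's own statement) =====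
-- stated objective: idiomatic
-- what changed: Replaces the manual index/lookahead while-loop with a regex tokenizer (greedy 1-2 digit runs or single chars) followed by a flat expansion comprehension.
import Mathlib
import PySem

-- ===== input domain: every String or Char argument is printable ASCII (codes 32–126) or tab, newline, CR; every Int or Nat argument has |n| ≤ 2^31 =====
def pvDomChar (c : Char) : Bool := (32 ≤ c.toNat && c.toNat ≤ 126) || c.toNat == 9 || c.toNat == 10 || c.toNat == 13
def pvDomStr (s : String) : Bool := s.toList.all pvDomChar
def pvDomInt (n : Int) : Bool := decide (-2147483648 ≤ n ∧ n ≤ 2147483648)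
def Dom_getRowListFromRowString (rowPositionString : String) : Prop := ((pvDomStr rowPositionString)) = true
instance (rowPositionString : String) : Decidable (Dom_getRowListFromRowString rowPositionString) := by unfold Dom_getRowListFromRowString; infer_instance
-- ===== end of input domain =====

-- B rewrites A's index/lookahead while-loop as a tokenize-then-expand pass (regex r'\d{1,2}|[\s\S]' then a flat expansion); objective: more idiomatic.

-- ===== PORT A =====
-- A walks the string with an index and a one-character lookahead; we recurse on the
-- character list with the same lookahead.  int(<1-2 ASCII digit string>) is its decimal
-- value (exact here: the branch is only taken when the chars satisfy isdigit, ASCII on Dom).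
def getRowListFromRowStringGo : List Char → List String
  | [] => []
  | [c] =>
    if PySem.Chars.isdigit c then
      List.replicate (c.toNat - 48) "e"              -- int(s[i]); no second char to look at
    else [String.mk [c]]
  | c :: d :: rest =>
    if PySem.Chars.isdigit c then
      if PySem.Chars.isdigit d then
        -- int(s[i:i+2]), then skip the second digit
        List.replicate (10 * (c.toNat - 48) + (d.toNat - 48)) "e" ++ getRowListFromRowStringGo rest
      else
        List.replicate (c.toNat - 48) "e" ++ getRowListFromRowStringGo (d :: rest)
    else String.mk [c] :: getRowListFromRowStringGo (d :: rest)

def getRowListFromRowString (rowPositionString : String) : List String :=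
  getRowListFromRowStringGo rowPositionString.toList

-- ===== PORT B =====
-- re.findall(r'\d{1,2}|[\s\S]', s): greedy 1-2 digit runs, otherwise single characters.
def pvTokenize : List Char → List (List Char)
  | [] => []
  | [c] => [[c]]
  | c :: d :: rest =>
    if PySem.Chars.isdigit c && PySem.Chars.isdigit d then [c, d] :: pvTokenize rest
    else [c] :: pvTokenize (d :: rest)

-- ['e'] * int(tok) if tok.isdigit() else [tok]
def pvExpand (t : List Char) : List String :=
  if t.all PySem.Chars.isdigit then
    List.replicate (t.foldl (fun a c => 10 * a + (c.toNat - 48)) 0) "e"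
  else [String.mk t]

def getRowListFromRowString_alt (rowPositionString : String) : List String :=
  (pvTokenize rowPositionString.toList).flatMap pvExpand

-- ===== PRECONDITION & SPEC =====
def Spec_getRowListFromRowString (rowPositionString : String) (out : List String) : Prop := out = getRowListFromRowString_alt rowPositionString
instance (rowPositionString : String) (out : List String) : Decidable (Spec_getRowListFromRowString rowPositionString out) := by unfold Spec_getRowListFromRowString; infer_instance

-- ===== CLAIM (what is proved, stated in full; the proofs are below) =====
def Claim_equal_getRowListFromRowString : Prop := ∀ (rowPositionString : String), Dom_getRowListFromRowString rowPositionString → Spec_getRowListFromRowString rowPositionString (getRowListFromRowString rowPositionString)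

-- ===== LEMMAS AND PROOFS =====
theorem go_eq_alt (l : List Char) :
    getRowListFromRowStringGo l = (pvTokenize l).flatMap pvExpand := by
  induction l using pvTokenize.induct with
  | case1 => rfl
  | case2 c =>
    by_cases hc : PySem.Chars.isdigit c = true <;>
      simp [getRowListFromRowStringGo, pvTokenize, pvExpand, hc]
  | case3 c d rest h ih =>
    rw [Bool.and_eq_true] at h
    simp [getRowListFromRowStringGo, pvTokenize, pvExpand, h.1, h.2, List.foldl, ih]
  | case4 c d rest h ih =>
    by_cases hc : PySem.Chars.isdigit c = true
    · have hd : PySem.Chars.isdigit d = false := by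
        cases hdd : PySem.Chars.isdigit d
        · rfl
        · exact absurd (by simp [hc, hdd]) h
      simp [getRowListFromRowStringGo, pvTokenize, pvExpand, hc, hd, ih]
    · simp [getRowListFromRowStringGo, pvTokenize, pvExpand, hc, ih]

-- ===== VERDICT (by name: the statement is the Claim_ definition above) =====
theorem getRowListFromRowString_spec : Claim_equal_getRowListFromRowString := by
  intro s _
  unfold Spec_getRowListFromRowString getRowListFromRowString getRowListFromRowString_alt
  exact go_eq_alt s.toList
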